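-- pv_equiv track=rewrite | github.com/iamMAHAM/NaN | immatriculation/immatriculation.py | verifier_matricule
-- ===== SOURCE A (Python) =====
-- def verifier_matricule(matricule):
--     if type(matricule) is str and matricule.upper() == matricule:
--         if matricule.isalnum():
--             longueur_matricule = len(matricule)
--             if longueur_matricule >= 2 and longueur_matricule <= 6:
--                 l1 = matricule[0]
--                 l2 = matricule[1]
--                 if l1.isalpha() and l2.isalpha():
--                     numbers = []
--                     for i in range(len(matricule)):
--                         lettre = matricule[i]
--                         if lettre.isdigit():
--                             numbers.append(lettre)
--
--                     if len(numbers) > 0: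
--                         indice_premier_nombre = matricule.index(numbers[0])
--                         if numbers[0] != "0" and matricule[indice_premier_nombre:].isdigit():
--                             return "Valide"
--                         return "Invalide"
--
--                     return "Valide"
--
--     return "Invalide"
-- ===== SOURCE B (Python) =====
-- def verifier_matricule(matricule):
--     if type(matricule) is not str or matricule.upper() != matricule or not matricule.isalnum():
--         return "Invalide"
--     if not (2 <= len(matricule) <= 6):
--         return "Invalide"
--     if not (matricule[0].isalpha() and matricule[1].isalpha()):
--         return "Invalide"
--     seen_digit = False
--     for c in matricule:
--         if c.isdigit():
--             if not seen_digit and c == "0":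
--                 return "Invalide"
--             seen_digit = True
--         elif seen_digit:
--             return "Invalide"
--     return "Valide"
-- ===== Notes on version B (the rewrite author's own statement) =====
-- stated objective: simpler
-- what changed: A collects all digit characters into a list, re-finds the first one with str.index and tests a tail slice with isdigit; B replaces all of that with a single left-to-right pass carrying one seen_digit boolean that rejects a leading zero digit or any character after a digit, keeping A's four guards.
import Mathlib
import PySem

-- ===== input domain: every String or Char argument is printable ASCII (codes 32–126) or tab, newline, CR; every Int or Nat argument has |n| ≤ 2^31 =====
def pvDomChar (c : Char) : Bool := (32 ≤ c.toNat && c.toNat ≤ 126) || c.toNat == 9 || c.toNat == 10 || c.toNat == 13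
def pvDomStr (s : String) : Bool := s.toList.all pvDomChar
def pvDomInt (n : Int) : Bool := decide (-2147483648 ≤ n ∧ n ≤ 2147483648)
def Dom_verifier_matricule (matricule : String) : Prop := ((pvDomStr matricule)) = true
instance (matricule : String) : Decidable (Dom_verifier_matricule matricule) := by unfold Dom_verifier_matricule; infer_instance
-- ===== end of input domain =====

-- B replaces A's digit-list / index / slice logic by one linear pass with a seen_digit flag; objective: simpler.

-- ===== PORT A =====
def verifier_matricule (matricule : String) : String :=
  -- `type(matricule) is str` is always true under the type convention
  if PySem.Str.upper matricule == matricule then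
    if PySem.Str.strIsalnum matricule then
      let longueur_matricule : Int := PySem.Str.len matricule
      if 2 ≤ longueur_matricule ∧ longueur_matricule ≤ 6 then
        -- matricule[0] / matricule[1]: in range because 2 ≤ len (the `none` arm is unreachable)
        match PySem.Str.pyGet? matricule 0, PySem.Str.pyGet? matricule 1 with
        | some l1, some l2 =>
          if PySem.Chars.isalpha l1 && PySem.Chars.isalpha l2 then
            -- for i in range(len(matricule)): … numbers.append(lettre); index always in range, default unreachable
            let numbers : List Char :=
              (PySem.List.pyRange 0 longueur_matricule).foldl
                (fun acc i =>
                  let lettre := PySem.List.pyGetD matricule.toList i ' '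
                  if PySem.Chars.isdigit lettre then acc ++ [lettre] else acc) []
            match numbers with
            | [] => "Valide"
            | c :: _ =>
              -- matricule.index(numbers[0]); the char is present, so find never returns -1
              let indice_premier_nombre := PySem.Str.find matricule (String.ofList [c])
              if c != '0' &&
                  PySem.Str.strIsdigit (PySem.Str.slice matricule (some indice_premier_nombre) none)
              then "Valide" else "Invalide"
          else "Invalide"
        | _, _ => "Invalide"
      else "Invalide"
    else "Invalide"
  else "Invalide"

-- ===== PORT B =====
-- the scan loop: seen = seen_digit so far
def pvScan : List Char → Bool → Bool
  | [], _ => true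
  | c :: rest, seen =>
    if PySem.Chars.isdigit c then
      if !seen && c == '0' then false else pvScan rest true
    else if seen then false
    else pvScan rest seen

def verifier_matricule_alt (matricule : String) : String :=
  if PySem.Str.upper matricule == matricule && PySem.Str.strIsalnum matricule then
    if 2 ≤ PySem.Str.len matricule ∧ PySem.Str.len matricule ≤ 6 then
      match matricule.toList with
      | c0 :: c1 :: _ =>
        if PySem.Chars.isalpha c0 && PySem.Chars.isalpha c1 then
          if pvScan matricule.toList false then "Valide" else "Invalide"
        else "Invalide"
      | _ => "Invalide"
    else "Invalide"
  else "Invalide"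

-- ===== PRECONDITION & SPEC =====
def Spec_verifier_matricule (matricule : String) (out : String) : Prop := out = verifier_matricule_alt matricule
instance (matricule : String) (out : String) : Decidable (Spec_verifier_matricule matricule out) := by unfold Spec_verifier_matricule; infer_instance

-- ===== CLAIM (what is proved, stated in full; the proofs are below) =====
def Claim_equal_verifier_matricule : Prop := ∀ (matricule : String), Dom_verifier_matricule matricule → Spec_verifier_matricule matricule (verifier_matricule matricule)

-- ===== LEMMAS AND PROOFS =====

-- scan with seen_digit already set accepts exactly an all-digit tail
theorem pvScan_true (xs : List Char) : pvScan xs true = xs.all PySem.Chars.isdigit := by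
  induction xs with
  | nil => rfl
  | cons c rest ih =>
    simp only [pvScan, List.all_cons]
    by_cases h : PySem.Chars.isdigit c <;> simp [h, ih]

-- A's value after the guards, written over the char list
def pvCoreA (l : List Char) : Bool :=
  match l.filter PySem.Chars.isdigit with
  | [] => true
  | c :: _ =>
    (c != '0') && PySem.Chars.strIsdigit (List.drop (List.findIdx PySem.Chars.isdigit l) l)

theorem pvScan_eq_coreA (l : List Char) : pvScan l false = pvCoreA l := by
  induction l with
  | nil => rfl
  | cons x t ih =>
    by_cases hx : PySem.Chars.isdigit x
    · simp only [pvCoreA, pvScan, hx, List.filter_cons_of_pos, List.findIdx_cons,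
        if_pos, cond_true, List.drop_zero]
      by_cases h0 : x = '0'
      · simp [h0, PySem.Chars.strIsdigit]
      · simp [h0, pvScan_true, PySem.Chars.strIsdigit, hx]
    · simp only [pvCoreA, pvScan, hx, List.filter_cons_of_neg, List.findIdx_cons,
        if_neg, cond_false, Bool.false_eq_true, not_false_eq_true, ih]
      cases hft : List.filter PySem.Chars.isdigit t with
      | nil => simp
      | cons c cs => simp [List.drop_succ_cons]

-- the head of the digit filter sits at findIdx, with no digit before it
theorem pvFilter_head (l : List Char) (c : Char) (cs : List Char)
    (h : l.filter PySem.Chars.isdigit = c :: cs) :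
    List.findIdx PySem.Chars.isdigit l < l.length ∧
    l[List.findIdx PySem.Chars.isdigit l]? = some c ∧
    ∀ i < List.findIdx PySem.Chars.isdigit l, ∀ x, l[i]? = some x →
      PySem.Chars.isdigit x = false := by
  induction l generalizing cs with
  | nil => simp at h
  | cons x t ih =>
    by_cases hx : PySem.Chars.isdigit x
    · rw [List.filter_cons_of_pos hx] at h
      obtain ⟨rfl, -⟩ := List.cons.inj h
      refine ⟨by simp [List.findIdx_cons, hx], by simp [List.findIdx_cons, hx], ?_⟩
      intro i hi
      simp [List.findIdx_cons, hx] at hi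
    · rw [List.filter_cons_of_neg hx] at h
      obtain ⟨h1, h2, h3⟩ := ih _ h
      refine ⟨by simpa [List.findIdx_cons, hx] using Nat.succ_lt_succ h1,
              by simpa [List.findIdx_cons, hx] using h2, ?_⟩
      intro i hi y hy
      have hi' : i < List.findIdx PySem.Chars.isdigit t + 1 := by
        simpa [List.findIdx_cons, hx] using hi
      cases i with
      | zero =>
        obtain rfl : x = y := by simpa using hy
        simp only [Bool.not_eq_true] at hx
        exact hx
      | succ j =>
        have hy' : t[j]? = some y := by simpa using hy
        exact h3 j (by omega) y hy'

-- matricule.index(first digit) is exactly findIdx isdigit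
theorem pvFind_eq_findIdx (l : List Char) (c : Char) (cs : List Char)
    (h : l.filter PySem.Chars.isdigit = c :: cs) :
    PySem.Chars.find l [c] = (List.findIdx PySem.Chars.isdigit l : Int) := by
  obtain ⟨hlt, hget, hnd⟩ := pvFilter_head l c cs h
  have hc : PySem.Chars.isdigit c = true := by
    have : c ∈ l.filter PySem.Chars.isdigit := by rw [h]; exact List.mem_cons_self
    exact (List.mem_filter.mp this).2
  have hmem : c ∈ l := by
    have : c ∈ l.filter PySem.Chars.isdigit := by rw [h]; exact List.mem_cons_self
    exact List.mem_of_mem_filter this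
  have hin : [c] <:+: l := by
    obtain ⟨s1, s2, hsp⟩ := List.append_of_mem hmem
    exact ⟨s1, s2, by simp [hsp]⟩
  have h0 : 0 ≤ PySem.Chars.find l [c] := (PySem.Chars.find_nonneg_iff l [c]).mpr hin
  obtain ⟨hpre, hmin⟩ := PySem.Chars.find_spec h0
  set p := List.findIdx PySem.Chars.isdigit l with hp
  have hprefix_iff : ∀ k : Nat, ([c] <+: List.drop k l) ↔ l[k]? = some c := by
    intro k
    constructor
    · rintro ⟨t2, ht2⟩
      have : (List.drop k l).head? = some c := by rw [← ht2]; rfl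
      rwa [List.head?_drop] at this
    · intro hk
      have : (List.drop k l).head? = some c := by rwa [List.head?_drop]
      cases hd : List.drop k l with
      | nil => simp [hd] at this
      | cons y ys =>
        rw [hd] at this
        obtain rfl : y = c := by simpa using this
        exact ⟨ys, by simp⟩
  have hple : (PySem.Chars.find l [c]).toNat ≤ p := by
    by_contra hgt
    exact hmin p (by omega) ((hprefix_iff p).mpr hget)
  have hpge : p ≤ (PySem.Chars.find l [c]).toNat := by
    by_contra hgt
    rw [Nat.not_le] at hgt
    have hpc : l[(PySem.Chars.find l [c]).toNat]? = some c := (hprefix_iff _).mp hpre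
    have hfd := hnd _ hgt c hpc
    rw [hc] at hfd
    exact Bool.noConfusion hfd
  omega

theorem pvAB (matricule : String) : verifier_matricule matricule = verifier_matricule_alt matricule := by
  unfold verifier_matricule verifier_matricule_alt
  by_cases hu : (PySem.Str.upper matricule == matricule) = true
  swap
  · simp [hu]
  by_cases ha : PySem.Str.strIsalnum matricule = true
  swap
  · have ha' : ¬ PySem.Chars.strIsalnum matricule.toList = true := by
      rwa [PySem.Str.strIsalnum_eq] at ha
    simp [hu, ha']
  have hguard : (PySem.Str.upper matricule == matricule && PySem.Str.strIsalnum matricule) = true := by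
    rw [hu, ha]; rfl
  rw [if_pos hu, if_pos ha, if_pos hguard]
  by_cases hl : 2 ≤ PySem.Str.len matricule ∧ PySem.Str.len matricule ≤ 6
  swap
  · rw [if_neg hl, if_neg hl]
  rw [if_pos hl, if_pos hl]
  have hlen2 : 2 ≤ matricule.toList.length := by
    have h2 := hl.1
    rw [PySem.Str.len_eq] at h2
    exact_mod_cast h2
  obtain ⟨a, b, t, hlt⟩ : ∃ a b t, matricule.toList = a :: b :: t := by
    cases hml : matricule.toList with
    | nil => rw [hml] at hlen2; simp at hlen2
    | cons a rest =>
      cases rest with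
      | nil => rw [hml] at hlen2; simp at hlen2
      | cons b t => exact ⟨a, b, t, rfl⟩
  have hget0 : PySem.Str.pyGet? matricule 0 = some a := by
    simp [hlt]
  have hget1 : PySem.Str.pyGet? matricule 1 = some b := by
    have h1 : (1 : Int) = ((1 : Nat) : Int) := rfl
    rw [h1, PySem.Str.pyGet?_natCast, hlt]
    rfl
  have hlenm : PySem.Str.len matricule = ((a :: b :: t).length : Int) := by
    rw [PySem.Str.len_eq, hlt]
  rw [hget0, hget1, hlt, hlenm]
  dsimp only
  by_cases hab : (PySem.Chars.isalpha a && PySem.Chars.isalpha b) = true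
  swap
  · rw [if_neg hab, if_neg hab]
  rw [if_pos hab, if_pos hab]
  -- reduce A's number-collecting loop to a filter
  have hnum :
      (PySem.List.pyRange 0 ((a :: b :: t).length : Int)).foldl
        (fun acc i =>
          let lettre := PySem.List.pyGetD (a :: b :: t) i ' '
          if PySem.Chars.isdigit lettre then acc ++ [lettre] else acc) [] =
      (a :: b :: t).filter PySem.Chars.isdigit := by
    rw [PySem.List.foldl_pyRange_zero_pyGetD' (a :: b :: t) ' '
        (fun acc x => if PySem.Chars.isdigit x then acc ++ [x] else acc) []]
    simpa using PySem.List.foldl_append_if PySem.Chars.isdigit (fun x => x) (a :: b :: t) []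
  rw [hnum, pvScan_eq_coreA]
  cases hft : (a :: b :: t).filter PySem.Chars.isdigit with
  | nil => simp [pvCoreA, hft]
  | cons c cs =>
    dsimp only
    have hfind : PySem.Chars.find (a :: b :: t) [c] =
        (List.findIdx PySem.Chars.isdigit (a :: b :: t) : Int) :=
      pvFind_eq_findIdx (a :: b :: t) c cs hft
    have hfindm : PySem.Str.find matricule (String.ofList [c]) =
        (List.findIdx PySem.Chars.isdigit (a :: b :: t) : Int) := by
      simp [PySem.Str.find_eq, hlt, hfind]
    have hslice : (PySem.Str.slice matricule
        (some (PySem.Str.find matricule (String.ofList [c]))) none).toList =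
        List.drop (List.findIdx PySem.Chars.isdigit (a :: b :: t)) (a :: b :: t) := by
      rw [hfindm]
      have hsf := PySem.List.slice_from (a :: b :: t)
        (a := (List.findIdx PySem.Chars.isdigit (a :: b :: t) : Int)) (by positivity)
      simp [PySem.Str.toList_slice, hlt, hsf]
    have hdig : PySem.Str.strIsdigit (PySem.Str.slice matricule
        (some (PySem.Str.find matricule (String.ofList [c]))) none) =
        PySem.Chars.strIsdigit
          (List.drop (List.findIdx PySem.Chars.isdigit (a :: b :: t)) (a :: b :: t)) := by
      rw [PySem.Str.strIsdigit_eq, hslice]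
    rw [hdig]
    simp only [pvCoreA, hft]

-- ===== VERDICT (by name: the statement is the Claim_ definition above) =====
theorem verifier_matricule_spec : Claim_equal_verifier_matricule := by
  intro m _
  unfold Spec_verifier_matricule
  exact pvAB m
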